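-- pv_equiv track=rewrite | github.com/Sathish111j/PLOS-backend | telegram-bot/bot/handlers/jobs.py | _fmt_job_list_header
-- ===== SOURCE A (Python) =====
-- IN_PROGRESS = {"pending", "processing", "running"}
--
-- def _fmt_job_list_header(jobs: list[dict]) -> str:
-- 	total = len(jobs)
-- 	completed = sum(1 for j in jobs if (j.get("status") or "").lower() in {"completed", "done"})
-- 	failed = sum(1 for j in jobs if (j.get("status") or "").lower() in {"failed", "error"})
-- 	running = sum(1 for j in jobs if (j.get("status") or "").lower() in IN_PROGRESS)
--
-- 	parts = [f"📥 *Ingest jobs* ({total} total)"]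
-- 	if running:
-- 		parts.append(f"⚙️ {running} running")
-- 	if completed:
-- 		parts.append(f"✅ {completed} completed")
-- 	if failed:
-- 		parts.append(f"❌ {failed} failed")
-- 	return "   ".join(parts)
-- ===== SOURCE B (Python) =====
-- IN_PROGRESS = {"pending", "processing", "running"}
--
-- def _fmt_job_list_header(jobs: list[dict]) -> str:
-- 	hist = {}
-- 	for j in jobs:
-- 		s = (j.get("status") or "").lower()
-- 		hist[s] = hist.get(s, 0) + 1
-- 	running = hist.get("pending", 0) + hist.get("processing", 0) + hist.get("running", 0)
-- 	completed = hist.get("completed", 0) + hist.get("done", 0)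
-- 	failed = hist.get("failed", 0) + hist.get("error", 0)
-- 	header = f"📥 *Ingest jobs* ({len(jobs)} total)"
-- 	tail = "".join(
-- 		f"   {mark} {n} {label}"
-- 		for mark, n, label in (("⚙️", running, "running"), ("✅", completed, "completed"), ("❌", failed, "failed"))
-- 		if n
-- 	)
-- 	return header + tail
-- ===== Notes on version B (the rewrite author's own statement) =====
-- stated objective: alternative
-- what changed: Replaces A's three separate filtered counting passes with a single pass that builds a histogram dict of normalized statuses and reads the three counts off it, and builds the result by concatenating conditional segments instead of joining a parts list.
import Mathlib
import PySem

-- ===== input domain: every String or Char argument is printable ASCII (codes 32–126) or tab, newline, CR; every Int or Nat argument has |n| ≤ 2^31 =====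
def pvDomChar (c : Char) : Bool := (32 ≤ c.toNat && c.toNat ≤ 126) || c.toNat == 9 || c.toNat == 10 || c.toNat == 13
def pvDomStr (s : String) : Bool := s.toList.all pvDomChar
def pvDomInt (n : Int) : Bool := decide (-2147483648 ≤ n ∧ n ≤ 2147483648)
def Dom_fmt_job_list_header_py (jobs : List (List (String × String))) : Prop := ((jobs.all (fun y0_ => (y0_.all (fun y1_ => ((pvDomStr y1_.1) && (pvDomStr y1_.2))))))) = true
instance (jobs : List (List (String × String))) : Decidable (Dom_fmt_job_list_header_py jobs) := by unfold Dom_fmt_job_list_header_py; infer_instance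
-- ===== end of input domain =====

-- B replaces A's three filtered counting passes with one histogram dict of normalized
-- statuses plus constant-time lookups, and builds the result by concatenating conditional
-- segments instead of joining a parts list (objective: alternative decomposition).

-- ===== PORT A =====
-- (j.get("status") or "").lower() : `or ""` maps both a missing key and "" to "", exactly getD "".
def pvStatus (j : List (String × String)) : String :=
  PySem.Str.lower (((PySem.Dict.mk j).get? "status").getD "")

def fmt_job_list_header_py (jobs : List (List (String × String))) : String :=
  let total : Int := jobs.length
  let completed : Int := jobs.foldl (fun acc j => if pvStatus j ∈ ["completed", "done"] then acc + 1 else acc) 0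
  let failed : Int := jobs.foldl (fun acc j => if pvStatus j ∈ ["failed", "error"] then acc + 1 else acc) 0
  let running : Int := jobs.foldl (fun acc j => if pvStatus j ∈ ["pending", "processing", "running"] then acc + 1 else acc) 0
  let parts : List String := ["📥 *Ingest jobs* (" ++ PySem.Int.toStr total ++ " total)"]
  let parts := if running ≠ 0 then parts ++ ["⚙️ " ++ PySem.Int.toStr running ++ " running"] else parts
  let parts := if completed ≠ 0 then parts ++ ["✅ " ++ PySem.Int.toStr completed ++ " completed"] else parts
  let parts := if failed ≠ 0 then parts ++ ["❌ " ++ PySem.Int.toStr failed ++ " failed"] else parts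
  PySem.Str.join "   " parts

-- ===== PORT B =====
def fmt_job_list_header_py_alt (jobs : List (List (String × String))) : String :=
  let hist : PySem.Dict String Int := jobs.foldl (fun d j =>
      let s := pvStatus j
      d.insert s (d.getD s 0 + 1)) PySem.Dict.empty
  let running : Int := hist.getD "pending" 0 + hist.getD "processing" 0 + hist.getD "running" 0
  let completed : Int := hist.getD "completed" 0 + hist.getD "done" 0
  let failed : Int := hist.getD "failed" 0 + hist.getD "error" 0
  let header : String := "📥 *Ingest jobs* (" ++ PySem.Int.toStr (jobs.length : Int) ++ " total)"
  let tail : String := PySem.Str.join ""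
    ((([("⚙️", running, "running"), ("✅", completed, "completed"), ("❌", failed, "failed")] :
        List (String × Int × String)).filter (fun t => decide (t.2.1 ≠ 0))).map
      (fun t => "   " ++ t.1 ++ " " ++ PySem.Int.toStr t.2.1 ++ " " ++ t.2.2))
  header ++ tail

-- ===== PRECONDITION & SPEC =====
def Spec_fmt_job_list_header_py (jobs : List (List (String × String))) (out : String) : Prop := out = fmt_job_list_header_py_alt jobs
instance (jobs : List (List (String × String))) (out : String) : Decidable (Spec_fmt_job_list_header_py jobs out) := by unfold Spec_fmt_job_list_header_py; infer_instance

-- ===== CLAIM (what is proved, stated in full; the proofs are below) =====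
def Claim_equal_fmt_job_list_header_py : Prop := ∀ (jobs : List (List (String × String))), Dom_fmt_job_list_header_py jobs → Spec_fmt_job_list_header_py jobs (fmt_job_list_header_py jobs)

-- ===== LEMMAS AND PROOFS =====

-- B's histogram lookup equals the number of jobs with that normalized status.
theorem pv_hist_getD (jobs : List (List (String × String))) (v : String) :
    (jobs.foldl (fun d j => d.insert (pvStatus j) (d.getD (pvStatus j) 0 + 1))
        (PySem.Dict.empty : PySem.Dict String Int)).getD v 0
      = ((jobs.map pvStatus).count v : Int) := by
  rw [show jobs.foldl (fun d j => d.insert (pvStatus j) (d.getD (pvStatus j) 0 + 1))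
        (PySem.Dict.empty : PySem.Dict String Int)
      = (jobs.map pvStatus).foldl (fun d s => d.insert s (d.getD s 0 + 1)) PySem.Dict.empty
    from (List.foldl_map (f := pvStatus) (g := fun (d : PySem.Dict String Int) s => d.insert s (d.getD s 0 + 1)) (l := jobs) (init := PySem.Dict.empty)).symm]
  rw [PySem.Dict.getD_foldl_insert_add_one]
  simp [PySem.Dict.empty, PySem.Dict.getD, PySem.Dict.get?]

-- A's 0/1-counting pass over two distinct target statuses splits into B's two histogram counts.
theorem pv_count_pair (jobs : List (List (String × String))) (a b : String) (h : a ≠ b) :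
    (jobs.countP (fun j => decide (pvStatus j ∈ [a, b])) : Int)
      = ((jobs.map pvStatus).count a : Int) + ((jobs.map pvStatus).count b : Int) := by
  induction jobs with
  | nil => simp
  | cons x xs ih =>
    simp only [List.countP_cons, List.map_cons, List.count_cons]
    by_cases h1 : pvStatus x = a <;> by_cases h2 : pvStatus x = b <;> simp_all <;> omega

-- Same for three pairwise-distinct target statuses.
theorem pv_count_triple (jobs : List (List (String × String))) (a b c : String)
    (hab : a ≠ b) (hac : a ≠ c) (hbc : b ≠ c) :
    (jobs.countP (fun j => decide (pvStatus j ∈ [a, b, c])) : Int)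
      = ((jobs.map pvStatus).count a : Int) + ((jobs.map pvStatus).count b : Int)
        + ((jobs.map pvStatus).count c : Int) := by
  induction jobs with
  | nil => simp
  | cons x xs ih =>
    simp only [List.countP_cons, List.map_cons, List.count_cons]
    by_cases h1 : pvStatus x = a <;> by_cases h2 : pvStatus x = b <;>
      by_cases h3 : pvStatus x = c <;> simp_all <;> omega

-- The two string assemblies agree for any counter values.
theorem pv_assemble (h : String) (r c f : Int) :
    PySem.Str.join "   "
      (if f ≠ 0 then
         (if c ≠ 0 then
            (if r ≠ 0 then [h] ++ ["⚙️ " ++ PySem.Int.toStr r ++ " running"] else [h])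
              ++ ["✅ " ++ PySem.Int.toStr c ++ " completed"]
          else (if r ≠ 0 then [h] ++ ["⚙️ " ++ PySem.Int.toStr r ++ " running"] else [h]))
           ++ ["❌ " ++ PySem.Int.toStr f ++ " failed"]
       else
         (if c ≠ 0 then
            (if r ≠ 0 then [h] ++ ["⚙️ " ++ PySem.Int.toStr r ++ " running"] else [h])
              ++ ["✅ " ++ PySem.Int.toStr c ++ " completed"]
          else (if r ≠ 0 then [h] ++ ["⚙️ " ++ PySem.Int.toStr r ++ " running"] else [h])))
    = h ++ PySem.Str.join ""
        ((([("⚙️", r, "running"), ("✅", c, "completed"), ("❌", f, "failed")] :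
            List (String × Int × String)).filter (fun t => decide (t.2.1 ≠ 0))).map
          (fun t => "   " ++ t.1 ++ " " ++ PySem.Int.toStr t.2.1 ++ " " ++ t.2.2)) := by
  by_cases hr : r = 0 <;> by_cases hc : c = 0 <;> by_cases hf : f = 0 <;>
    · apply String.toList_inj.mp
      simp [hr, hc, hf, List.filter, PySem.Str.join, PySem.Chars.join, List.intercalate]

-- ===== VERDICT (by name: the statement is the Claim_ definition above) =====
theorem fmt_job_list_header_py_spec : Claim_equal_fmt_job_list_header_py := by
  intro jobs _
  unfold Spec_fmt_job_list_header_py fmt_job_list_header_py fmt_job_list_header_py_alt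
  simp only [pv_hist_getD, PySem.List.foldl_ite_add_one, zero_add]
  rw [pv_count_pair jobs "completed" "done" (by decide),
      pv_count_pair jobs "failed" "error" (by decide),
      pv_count_triple jobs "pending" "processing" "running" (by decide) (by decide) (by decide)]
  exact pv_assemble _ _ _ _
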